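-- pv_equiv track=rewrite | github.com/satish-ravi/advent-of-code | 2023/13/solution.py | find_horizontal_mirror
-- ===== SOURCE A (Python) =====
-- def count_different_characters(str1, str2):
--     # Ensure both strings have the same length
--     if len(str1) != len(str2):
--         raise ValueError("Both strings must have the same length.")
--
--     # Count the number of different characters
--     count = sum(ch1 != ch2 for ch1, ch2 in zip(str1, str2))
--
--     return count
--
-- def find_horizontal_mirror(grid, max_delta=0):
--     rows = len(grid)
--     for r in range(1, rows):
--         # mirror is above row r
--         delta = 0
--         for top in range(r - 1, -1, -1):
--             bottom = 2 * r - top - 1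
--             if bottom >= rows:
--                 break
--             delta += count_different_characters(grid[top], grid[bottom])
--             if delta > max_delta:
--                 break
--         if delta == max_delta:
--             return r
-- ===== SOURCE B (Python) =====
-- def find_horizontal_mirror(grid, max_delta=0):
--     # Stage 1: one pass over all row pairs (i, j), i < j, i + j odd, bucketing
--     # the pair's character-mismatch count into the anti-diagonal slot
--     # r = (i + j + 1) // 2 (the mirror line between rows i and j).
--     # Stage 2: scan the table for the first r with an exact total of max_delta.
--     # Correct because the pairs a mirror at r reflects are exactly the in-range
--     # pairs with i + j = 2r - 1, and an early-abandoned candidate in the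
--     # reference code has a partial sum already above max_delta, so its full
--     # total cannot equal max_delta either (mismatch counts are nonnegative).
--     n = len(grid)
--     if any(len(row) != len(grid[0]) for row in grid[1:]):
--         raise ValueError("Both strings must have the same length.")
--     totals = [0] * n
--     for i in range(n):
--         for j in range(i + 1, n):
--             if (i + j) % 2 == 1:
--                 totals[(i + j + 1) // 2] += sum(a != b for a, b in zip(grid[i], grid[j]))
--     for r in range(1, n):
--         if totals[r] == max_delta:
--             return r
--     return None
-- ===== Notes on version B (the rewrite author's own statement) =====
-- stated objective: alternative
-- what changed: B replaces A's per-candidate mirror walk with early exits by a two-stage pair-bucketing algorithm: after validating that the grid is rectangular, one pass over all row pairs (i,j) with i+j odd accumulates each pair's mismatch count into a table slot for its anti-diagonal r=(i+j+1)//2, then a second pass scans the table for the first r whose total equals max_delta.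
-- outside the precondition, e.g. on find_horizontal_mirror(['a', 'a', 'bb'], 0): A returns 1, B raises ValueError
import Mathlib
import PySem

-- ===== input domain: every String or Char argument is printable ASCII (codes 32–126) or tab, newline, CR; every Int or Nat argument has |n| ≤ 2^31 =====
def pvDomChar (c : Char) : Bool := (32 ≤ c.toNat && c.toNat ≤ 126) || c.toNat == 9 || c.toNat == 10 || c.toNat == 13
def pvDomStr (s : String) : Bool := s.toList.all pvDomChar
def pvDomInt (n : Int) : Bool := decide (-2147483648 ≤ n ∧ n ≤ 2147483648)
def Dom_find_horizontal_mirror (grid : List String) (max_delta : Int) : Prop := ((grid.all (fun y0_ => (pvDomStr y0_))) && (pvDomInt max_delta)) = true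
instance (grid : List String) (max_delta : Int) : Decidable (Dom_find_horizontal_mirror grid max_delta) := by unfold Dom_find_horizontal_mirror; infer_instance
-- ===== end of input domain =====

-- B replaces A's per-candidate mirror walk (with early exits) by a two-stage algorithm:
-- bucket every odd row pair's mismatch count into its anti-diagonal slot, then scan the
-- table for the first slot equal to max_delta (objective: alternative decomposition).

-- ===== PORT A =====
-- count_different_characters: both Pythons compute this zip-count (A via its helper, B
-- inline); under Pre_ all rows have equal length, so A's ValueError branch never fires
-- and the zip-based count is exact there.
def pvHamm (s1 s2 : String) : Int :=
  (((s1.toList.zip s2.toList).filter (fun p => p.1 != p.2)).length : Int)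

-- inner 'for top in range(r-1,-1,-1)' with its two breaks; grid[top]/grid[bottom]
-- ported as pyGetD (indices are in range on every reachable iteration)
def pvLoopA (grid : List String) (rows r max_delta : Int) : List Int → Int → Int
  | [], delta => delta
  | top :: rest, delta =>
    let bottom := 2 * r - top - 1
    if rows ≤ bottom then delta
    else
      let d' := delta + pvHamm (PySem.List.pyGetD grid top "") (PySem.List.pyGetD grid bottom "")
      if max_delta < d' then d' else pvLoopA grid rows r max_delta rest d'

def pvOuterA (grid : List String) (rows max_delta : Int) : List Int → Option Int
  | [] => none
  | r :: rest =>
    let delta := pvLoopA grid rows r max_delta (PySem.List.pyRange (r - 1) (-1) (-1)) 0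
    if delta = max_delta then some r else pvOuterA grid rows max_delta rest

def find_horizontal_mirror (grid : List String) (max_delta : Int) : Option Int :=
  pvOuterA grid (grid.length : Int) max_delta (PySem.List.pyRange 1 (grid.length : Int) 1)

-- ===== PORT B =====
-- body of Source B's double loop: 'if (i + j) % 2 == 1: totals[(i+j+1)//2] += sum(...)';
-- the written slot is always in range, so pySetD/pyGetD are exact here
def pvStepB (grid : List String) (t : List Int) (i j : Int) : List Int :=
  if PySem.Int.mod (i + j) 2 = 1 then
    PySem.List.pySetD t (PySem.Int.floordiv (i + j + 1) 2)
      (PySem.List.pyGetD t (PySem.Int.floordiv (i + j + 1) 2) 0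
        + pvHamm (PySem.List.pyGetD grid i "") (PySem.List.pyGetD grid j ""))
  else t

-- Source B's upfront rectangularity validation raises exactly on the ragged grids that
-- Pre_ excludes, so it has no Lean counterpart here (the port is exact under Pre_)
-- 'for r in range(1, n): if totals[r] == max_delta: return r'
def pvScanB (totals : List Int) (max_delta : Int) : List Int → Option Int
  | [] => none
  | r :: rest =>
    if PySem.List.pyGetD totals r 0 = max_delta then some r else pvScanB totals max_delta rest

def find_horizontal_mirror_alt (grid : List String) (max_delta : Int) : Option Int :=
  let n : Int := (grid.length : Int)
  let totals :=
    (PySem.List.pyRange 0 n 1).foldl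
      (fun t i => (PySem.List.pyRange (i + 1) n 1).foldl (fun t j => pvStepB grid t i j) t)
      (List.replicate grid.length 0)
  pvScanB totals max_delta (PySem.List.pyRange 1 n 1)

-- ===== PRECONDITION & SPEC =====
-- Pre_ excludes ragged grids (rows of differing lengths): there A's helper raises
-- ValueError at the first unequal pair it compares (A returns a value on such a grid
-- only when an earlier mirror matches first), and B's upfront validation raises too.
def Pre_find_horizontal_mirror (grid : List String) (max_delta : Int) : Prop :=
  ∀ s ∈ grid, ∀ t ∈ grid, s.toList.length = t.toList.length

instance (grid : List String) (max_delta : Int) : Decidable (Pre_find_horizontal_mirror grid max_delta) := by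
  unfold Pre_find_horizontal_mirror; infer_instance

def pvWitness_find_horizontal_mirror : List String × Int := (["#.", "#.", "##"], 0)

def Spec_find_horizontal_mirror (grid : List String) (max_delta : Int) (out : Option Int) : Prop := out = find_horizontal_mirror_alt grid max_delta
instance (grid : List String) (max_delta : Int) (out : Option Int) : Decidable (Spec_find_horizontal_mirror grid max_delta out) := by unfold Spec_find_horizontal_mirror; infer_instance

-- ===== CLAIM (what is proved, stated in full; the proofs are below) =====
def Claim_equal_find_horizontal_mirror : Prop := ∀ (grid : List String) (max_delta : Int), Dom_find_horizontal_mirror grid max_delta → Pre_find_horizontal_mirror grid max_delta → Spec_find_horizontal_mirror grid max_delta (find_horizontal_mirror grid max_delta)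

-- ===== LEMMAS AND PROOFS =====

-- the mismatch count contributed by row pair (i, 2r-1-i) to mirror line r (0 if the
-- bottom row is out of range)
def pvDterm (grid : List String) (r i : Int) : Int :=
  if 2 * r - i - 1 < (grid.length : Int) then
    pvHamm (PySem.List.pyGetD grid i "") (PySem.List.pyGetD grid (2 * r - i - 1) "")
  else 0

-- the full (no early exit) mismatch total of mirror line r over tops 0..m-1
def pvTsum (grid : List String) (r : Int) (m : Nat) : Int :=
  ((List.range m).map (fun i : Nat => pvDterm grid r (i : Int))).sum

-- the contribution of pair p to slot r in B's bucketing pass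
def pvContrib (grid : List String) (r : Int) (p : Int × Int) : Int :=
  if PySem.Int.mod (p.1 + p.2) 2 = 1 ∧ PySem.Int.floordiv (p.1 + p.2 + 1) 2 = r then
    pvHamm (PySem.List.pyGetD grid p.1 "") (PySem.List.pyGetD grid p.2 "")
  else 0

theorem pvHamm_nonneg (s1 s2 : String) : 0 ≤ pvHamm s1 s2 := Int.natCast_nonneg _

theorem pvDterm_nonneg (grid : List String) (r i : Int) : 0 ≤ pvDterm grid r i := by
  unfold pvDterm; split
  · exact pvHamm_nonneg _ _
  · exact le_refl 0

theorem pvTsum_nonneg (grid : List String) (r : Int) (m : Nat) : 0 ≤ pvTsum grid r m := by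
  unfold pvTsum
  apply List.sum_nonneg
  intro x hx
  obtain ⟨i, -, rfl⟩ := List.mem_map.mp hx
  exact pvDterm_nonneg _ _ _

theorem pvTsum_succ (grid : List String) (r : Int) (m : Nat) :
    pvTsum grid r (m + 1) = pvTsum grid r m + pvDterm grid r (m : Int) := by
  unfold pvTsum
  simp [List.range_succ]

-- A's inner loop over tops m-1, m-2, …, 0: its result is at most delta + full total,
-- and either equals it (no early exit) or exceeds max_delta (early exit)
theorem pvLoopA_cons (grid : List String) (rows r md top delta : Int) (rest : List Int) :
    pvLoopA grid rows r md (top :: rest) delta =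
      if rows ≤ 2 * r - top - 1 then delta
      else
        (if md < delta + pvHamm (PySem.List.pyGetD grid top "") (PySem.List.pyGetD grid (2 * r - top - 1) "")
         then delta + pvHamm (PySem.List.pyGetD grid top "") (PySem.List.pyGetD grid (2 * r - top - 1) "")
         else pvLoopA grid rows r md rest
           (delta + pvHamm (PySem.List.pyGetD grid top "") (PySem.List.pyGetD grid (2 * r - top - 1) ""))) := rfl

theorem loopA_char (grid : List String) (r md : Int) : ∀ (m : Nat) (delta : Int),
    pvLoopA grid (grid.length : Int) r md (PySem.List.pyRange ((m : Int) - 1) (-1) (-1)) delta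
      ≤ delta + pvTsum grid r m ∧
    (pvLoopA grid (grid.length : Int) r md (PySem.List.pyRange ((m : Int) - 1) (-1) (-1)) delta
      = delta + pvTsum grid r m ∨
     md < pvLoopA grid (grid.length : Int) r md (PySem.List.pyRange ((m : Int) - 1) (-1) (-1)) delta) := by
  intro m
  induction m with
  | zero =>
    intro delta
    rw [show ((0 : Nat) : Int) - 1 = -1 by norm_num, PySem.List.pyRange_neg_one_eq_nil le_rfl]
    unfold pvTsum
    simp [pvLoopA]
  | succ m ih =>
    intro delta
    rw [show (((m + 1 : Nat)) : Int) - 1 = (m : Int) by omega,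
        PySem.List.pyRange_neg_one_cons (by omega : (-1 : Int) < (m : Int)), pvLoopA_cons]
    by_cases hb : (grid.length : Int) ≤ 2 * r - (m : Int) - 1
    · rw [if_pos hb]
      have hT : pvTsum grid r (m + 1) = 0 := by
        unfold pvTsum
        apply List.sum_eq_zero
        intro x hx
        obtain ⟨i, hi, rfl⟩ := List.mem_map.mp hx
        rw [List.mem_range] at hi
        unfold pvDterm
        rw [if_neg (by omega)]
      omega
    · rw [if_neg hb]
      have hdt : pvDterm grid r (m : Int)
          = pvHamm (PySem.List.pyGetD grid (m : Int) "") (PySem.List.pyGetD grid (2 * r - (m : Int) - 1) "") := by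
        unfold pvDterm
        rw [if_pos (by omega)]
      have hsucc := pvTsum_succ grid r m
      rw [hdt] at hsucc
      set H := pvHamm (PySem.List.pyGetD grid (m : Int) "") (PySem.List.pyGetD grid (2 * r - (m : Int) - 1) "") with hH
      by_cases hmd : md < delta + H
      · rw [if_pos hmd]
        have := pvTsum_nonneg grid r m
        omega
      · rw [if_neg hmd]
        have := ih (delta + H)
        omega

-- one step of B's bucketing pass: length is preserved and slot r gains exactly
-- the pair's contribution
theorem stepB_char (grid : List String) (t : List Int) (i j : Int)
    (ht : t.length = grid.length) (h0 : 0 ≤ i) (hij : i < j) (hj : j < (grid.length : Int)) :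
    (pvStepB grid t i j).length = grid.length ∧
    ∀ r : Int, 0 ≤ r → r < (grid.length : Int) →
      PySem.List.pyGetD (pvStepB grid t i j) r 0
        = PySem.List.pyGetD t r 0 + pvContrib grid r (i, j) := by
  unfold pvStepB
  by_cases hmod : PySem.Int.mod (i + j) 2 = 1
  · rw [if_pos hmod]
    have hmod' : (i + j) % 2 = 1 := by
      rw [← PySem.Int.mod_eq_emod_of_pos (by norm_num)]; exact hmod
    set k := PySem.Int.floordiv (i + j + 1) 2 with hk
    have hbr : k * 2 ≤ i + j + 1 ∧ i + j + 1 < (k + 1) * 2 :=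
      (PySem.Int.floordiv_eq_iff_of_pos (by norm_num)).mp hk.symm
    have hkeq : i + j + 1 = 2 * k := by omega
    have hk1 : 1 ≤ k := by omega
    have hkn : k < (grid.length : Int) := by omega
    rw [PySem.List.pySetD_of_nonneg t _ (by omega)]
    constructor
    · rw [List.length_set, ht]
    · intro r hr0 hrn
      rw [PySem.List.pyGetD_eq_getElem _ _ hr0 (by rw [List.length_set]; omega)]
      rw [List.getElem_set]
      by_cases hrk : r = k
      · rw [if_pos (by omega)]
        have hcon : pvContrib grid r (i, j)
            = pvHamm (PySem.List.pyGetD grid i "") (PySem.List.pyGetD grid j "") := by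
          simp only [pvContrib]
          rw [if_pos ⟨hmod, by omega⟩]
        rw [hcon, hrk]
      · rw [if_neg (by omega)]
        have hcon : pvContrib grid r (i, j) = 0 := by
          simp only [pvContrib]
          rw [if_neg (by rintro ⟨-, h⟩; omega)]
        rw [hcon, PySem.List.pyGetD_eq_getElem _ _ hr0 (by omega)]
        omega
  · rw [if_neg hmod]
    refine ⟨ht, ?_⟩
    intro r _ _
    have hcon : pvContrib grid r (i, j) = 0 := by
      simp only [pvContrib]
      rw [if_neg (by rintro ⟨h, -⟩; exact hmod h)]
    rw [hcon]
    ring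

-- B's bucketing fold over an explicit pair list: length is preserved and each slot
-- accumulates exactly the contributions of the processed pairs
theorem foldB_getD (grid : List String) :
    ∀ (ps : List (Int × Int)) (t : List Int), t.length = grid.length →
    (∀ p ∈ ps, 0 ≤ p.1 ∧ p.1 < p.2 ∧ p.2 < (grid.length : Int)) →
    (ps.foldl (fun t p => pvStepB grid t p.1 p.2) t).length = grid.length ∧
    ∀ r : Int, 0 ≤ r → r < (grid.length : Int) →
      PySem.List.pyGetD (ps.foldl (fun t p => pvStepB grid t p.1 p.2) t) r 0
        = PySem.List.pyGetD t r 0 + (ps.map (pvContrib grid r)).sum := by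
  intro ps
  induction ps with
  | nil =>
    intro t ht _
    refine ⟨ht, ?_⟩
    intro r _ _
    simp
  | cons p ps ih =>
    intro t ht hb
    obtain ⟨hp0, hp12, hp2⟩ := hb p List.mem_cons_self
    have hstep := stepB_char grid t p.1 p.2 ht hp0 hp12 hp2
    have ihs := ih (pvStepB grid t p.1 p.2) hstep.1 (fun q hq => hb q (List.mem_cons_of_mem _ hq))
    refine ⟨by simpa using ihs.1, ?_⟩
    intro r hr0 hrn
    have := ihs.2 r hr0 hrn
    simp only [List.foldl_cons, List.map_cons, List.sum_cons]
    rw [this, hstep.2 r hr0 hrn]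
    ring

-- a sum over a strictly increasing list whose terms vanish off a single point
theorem sum_map_single (f : Int → Int) (j0 : Int) :
    ∀ l : List Int, l.Pairwise (· < ·) → (∀ j ∈ l, j ≠ j0 → f j = 0) →
    (l.map f).sum = if j0 ∈ l then f j0 else 0 := by
  intro l
  induction l with
  | nil => simp
  | cons a l ih =>
    intro hpw hz
    have hpw' := (List.pairwise_cons.mp hpw).2
    have hlt := (List.pairwise_cons.mp hpw).1
    by_cases ha : a = j0
    · subst ha
      have hnot : a ∉ l := fun h => lt_irrefl a (hlt a h)
      have hzl : (l.map f).sum = 0 := by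
        apply List.sum_eq_zero
        intro x hx
        obtain ⟨j, hj, rfl⟩ := List.mem_map.mp hx
        exact hz j (List.mem_cons_of_mem _ hj) (fun h => hnot (h ▸ hj))
      simp [hzl]
    · have hfa : f a = 0 := hz a List.mem_cons_self ha
      rw [List.map_cons, List.sum_cons, hfa, zero_add,
          ih hpw' (fun j hj => hz j (List.mem_cons_of_mem _ hj))]
      simp [List.mem_cons, ha, Ne.symm]

-- the inner j-pass of B for a fixed i contributes pvDterm grid r i to slot r when
-- i < r, and nothing when i ≥ r
theorem innerB_sum (grid : List String) (r i : Int) :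
    (((PySem.List.pyRange (i + 1) (grid.length : Int) 1).map (fun j => (i, j))).map (pvContrib grid r)).sum
      = if i < r then pvDterm grid r i else 0 := by
  rw [List.map_map]
  have hpar : ∀ j : Int, PySem.Int.mod (i + j) 2 = 1 ∧ PySem.Int.floordiv (i + j + 1) 2 = r
      → i + j = 2 * r - 1 := by
    intro j ⟨hm, hf⟩
    rw [PySem.Int.mod_eq_emod_of_pos (by norm_num)] at hm
    have := (PySem.Int.floordiv_eq_iff_of_pos (by norm_num)).mp hf
    omega
  rw [sum_map_single _ (2 * r - i - 1) _ (PySem.List.pairwise_lt_pyRange_one _ _)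
      (by
        intro j hj hne
        simp only [Function.comp]
        unfold pvContrib
        rw [if_neg]
        rintro hc
        exact hne (by have := hpar j hc; omega))]
  by_cases hir : i < r
  · by_cases hbn : 2 * r - i - 1 < (grid.length : Int)
    · rw [if_pos (by rw [PySem.List.mem_pyRange_one]; omega), if_pos hir]
      have h1 : PySem.Int.mod (i + (2 * r - i - 1)) 2 = 1 := by
        rw [PySem.Int.mod_eq_emod_of_pos (by norm_num)]
        omega
      have h2 : PySem.Int.floordiv (i + (2 * r - i - 1) + 1) 2 = r := by
        rw [PySem.Int.floordiv_eq_iff_of_pos (by norm_num)]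
        omega
      simp only [Function.comp_apply, pvContrib, pvDterm, h1, h2, and_self, if_true]
      rw [if_pos hbn]
    · rw [if_neg (by rw [PySem.List.mem_pyRange_one]; omega), if_pos hir]
      unfold pvDterm
      rw [if_neg hbn]
  · rw [if_neg (by rw [PySem.List.mem_pyRange_one]; omega), if_neg hir]

-- the nested double loop of B is the fold over the flattened pair list
theorem nested_foldl (grid : List String) (l : List Int) (g : Int → List Int) (t : List Int) :
    l.foldl (fun t i => (g i).foldl (fun t j => pvStepB grid t i j) t) t
      = (l.flatMap (fun i => (g i).map (fun j => (i, j)))).foldl (fun t p => pvStepB grid t p.1 p.2) t := by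
  induction l generalizing t with
  | nil => rfl
  | cons a l ih =>
    rw [List.flatMap_cons, List.foldl_append, List.foldl_cons, ih, List.foldl_map]

-- summing a function over a flattened list, outer list by outer list
theorem map_flatMap_sum (l : List Int) (f : Int → List (Int × Int)) (g : Int × Int → Int) :
    ((l.flatMap f).map g).sum = (l.map (fun x => ((f x).map g).sum)).sum := by
  rw [List.map_flatMap]
  induction l with
  | nil => rfl
  | cons a l ih => rw [List.flatMap_cons, List.sum_append, List.map_cons, List.sum_cons, ih]

-- B's table at slot r holds the full mismatch total of mirror line r
theorem totalsB_eq (grid : List String) (r : Int) (hr : 1 ≤ r) (hrn : r < (grid.length : Int)) :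
    PySem.List.pyGetD
      ((PySem.List.pyRange 0 (grid.length : Int) 1).foldl
        (fun t i => (PySem.List.pyRange (i + 1) (grid.length : Int) 1).foldl (fun t j => pvStepB grid t i j) t)
        (List.replicate grid.length 0)) r 0
      = pvTsum grid r r.toNat := by
  rw [nested_foldl]
  have hps : ∀ p ∈ (PySem.List.pyRange 0 (grid.length : Int) 1).flatMap
      (fun i => (PySem.List.pyRange (i + 1) (grid.length : Int) 1).map (fun j => (i, j))),
      0 ≤ p.1 ∧ p.1 < p.2 ∧ p.2 < (grid.length : Int) := by
    intro p hp
    obtain ⟨i, hi, hpmem⟩ := List.mem_flatMap.mp hp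
    obtain ⟨j, hj, rfl⟩ := List.mem_map.mp hpmem
    rw [PySem.List.mem_pyRange_one] at hi hj
    exact ⟨hi.1, by omega, hj.2⟩
  have hfold := (foldB_getD grid _ (List.replicate grid.length 0)
    (List.length_replicate) hps).2 r (by omega) hrn
  rw [hfold]
  have hrep : PySem.List.pyGetD (List.replicate grid.length (0 : Int)) r 0 = 0 := by
    rw [PySem.List.pyGetD_eq_getElem _ _ (by omega) (by rw [List.length_replicate]; omega)]
    simp
  rw [hrep, zero_add, map_flatMap_sum]
  have hcong : (PySem.List.pyRange 0 (grid.length : Int) 1).map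
        (fun i => (((PySem.List.pyRange (i + 1) (grid.length : Int) 1).map (fun j => (i, j))).map (pvContrib grid r)).sum)
      = (PySem.List.pyRange 0 (grid.length : Int) 1).map
        (fun i => if i < r then pvDterm grid r i else 0) := by
    apply List.map_congr_left
    intro i hi
    rw [PySem.List.mem_pyRange_one] at hi
    exact innerB_sum grid r i
  rw [hcong]
  rw [PySem.List.pyRange_one_append 0 r (grid.length : Int) (by omega) (by omega),
      List.map_append, List.sum_append]
  have hsecond : ((PySem.List.pyRange r (grid.length : Int) 1).map
      (fun i => if i < r then pvDterm grid r i else 0)).sum = 0 := by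
    apply List.sum_eq_zero
    intro x hx
    obtain ⟨i, hi, rfl⟩ := List.mem_map.mp hx
    rw [PySem.List.mem_pyRange_one] at hi
    rw [if_neg (by omega)]
  rw [hsecond, add_zero]
  have hfirst : (PySem.List.pyRange 0 r 1).map (fun i => if i < r then pvDterm grid r i else 0)
      = (PySem.List.pyRange 0 r 1).map (fun i => pvDterm grid r i) := by
    apply List.map_congr_left
    intro i hi
    rw [PySem.List.mem_pyRange_one] at hi
    rw [if_pos hi.2]
  rw [hfirst, PySem.List.pyRange_one, List.map_map, sub_zero]
  unfold pvTsum
  apply congrArg List.sum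
  apply List.map_congr_left
  intro k _
  simp

theorem outer_eq (grid : List String) (md : Int) : ∀ rs : List Int,
    (∀ r ∈ rs, 1 ≤ r ∧ r < (grid.length : Int)) →
    pvOuterA grid (grid.length : Int) md rs
      = pvScanB
          ((PySem.List.pyRange 0 (grid.length : Int) 1).foldl
            (fun t i => (PySem.List.pyRange (i + 1) (grid.length : Int) 1).foldl (fun t j => pvStepB grid t i j) t)
            (List.replicate grid.length 0)) md rs := by
  intro rs
  induction rs with
  | nil => intro _; rfl
  | cons r rest ih =>
    intro hrs
    obtain ⟨hr1, hrn⟩ := hrs r List.mem_cons_self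
    have hTot := totalsB_eq grid r hr1 hrn
    have hchar := loopA_char grid r md r.toNat 0
    rw [Int.toNat_of_nonneg (by omega : (0 : Int) ≤ r)] at hchar
    rw [zero_add] at hchar
    simp only [pvOuterA, pvScanB]
    obtain ⟨hle, hor⟩ := hchar
    by_cases h : pvLoopA grid (grid.length : Int) r md (PySem.List.pyRange (r - 1) (-1) (-1)) 0 = md
    · rw [if_pos h, if_pos (by rw [hTot]; rcases hor with h2 | h2 <;> omega)]
    · rw [if_neg h, if_neg (by rw [hTot]; rcases hor with h2 | h2 <;> omega)]
      exact ih (fun x hx => hrs x (List.mem_cons_of_mem _ hx))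

-- ===== VERDICT (by name: the statement is the Claim_ definition above) =====
theorem find_horizontal_mirror_spec : Claim_equal_find_horizontal_mirror := by
  intro grid md _ _
  unfold Spec_find_horizontal_mirror find_horizontal_mirror find_horizontal_mirror_alt
  exact outer_eq grid md _ (fun r hr => by
    rw [PySem.List.mem_pyRange_one] at hr; exact hr)
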